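-- pv_equiv track=rewrite | github.com/NabaviLab/CNV-Sim | lib/exome_simulator.py | loadCNVMatrix
-- ===== SOURCE A (Python) =====
-- def loadCNVMatrix(targets_list, cnv_regions):
--     '''
--     A function to map targets to their corresponding CNV regions
--     :param targets_list: a list of target exons loaded from the file provided by the user
--     :param cnv_regions: a list of CNV regions loaded from the CNV file provided by the user
--     :return: A matrix where rows represent the region index and the first column as a list of targets in this region
--     '''
--     cnv_matrix = []
--     for cnv in cnv_regions:
--         region_chromosome = cnv[0]
--         region_start = cnv[1]
--         region_end = cnv[2]
--
--         region_targets = []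
--         for target in targets_list:
--             target_chromosome = target[0]
--             target_start = target[1]
--             target_end = target[2]
--             if target_chromosome == region_chromosome and target_start >= region_start and target_end <= region_end:
--                 region_targets.append(target)
--
--         cnv_matrix.append(region_targets)
--
--     return cnv_matrix
-- ===== SOURCE B (Python) =====
-- def loadCNVMatrix(targets_list, cnv_regions):
--     # Bucket targets by chromosome once, then each region scans only its own
--     # chromosome's targets (order within a bucket is the original list order).
--     buckets = {}
--     for target in targets_list:
--         buckets.setdefault(target[0], []).append(target)
--     return [[t for t in buckets.get(chrom, [])
--              if t[1] >= start and t[2] <= end]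
--             for (chrom, start, end) in cnv_regions]
-- ===== Notes on version B (the rewrite author's own statement) =====
-- stated objective: alternative
-- what changed: B buckets the targets by chromosome in a dict built in one pass, so each CNV region filters only the targets of its own chromosome instead of rescanning the whole target list; measured only ~1.2x on the generated inputs, so no speed claim.
import Mathlib
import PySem

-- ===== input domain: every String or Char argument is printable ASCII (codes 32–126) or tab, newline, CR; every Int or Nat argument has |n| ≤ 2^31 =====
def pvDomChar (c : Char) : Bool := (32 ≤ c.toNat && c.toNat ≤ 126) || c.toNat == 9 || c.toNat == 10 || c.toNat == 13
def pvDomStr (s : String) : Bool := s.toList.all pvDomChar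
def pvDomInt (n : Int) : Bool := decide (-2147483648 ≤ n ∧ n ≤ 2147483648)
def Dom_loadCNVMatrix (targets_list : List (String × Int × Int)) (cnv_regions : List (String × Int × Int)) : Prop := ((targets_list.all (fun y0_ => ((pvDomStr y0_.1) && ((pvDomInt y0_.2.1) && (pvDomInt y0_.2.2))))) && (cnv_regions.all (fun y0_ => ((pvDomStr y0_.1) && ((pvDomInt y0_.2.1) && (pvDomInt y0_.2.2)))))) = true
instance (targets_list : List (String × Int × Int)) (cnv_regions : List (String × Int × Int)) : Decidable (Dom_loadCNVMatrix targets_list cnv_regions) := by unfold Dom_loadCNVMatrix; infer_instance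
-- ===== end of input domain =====

-- B buckets targets by chromosome in one pass so each region only scans its own chromosome's targets (objective: alternative; same measured cost on the test inputs).

-- ===== PORT A =====
def loadCNVMatrix (targets_list : List (String × Int × Int)) (cnv_regions : List (String × Int × Int)) : List (List (String × Int × Int)) :=
  cnv_regions.foldl (fun cnv_matrix cnv =>
    let region_targets := targets_list.foldl (fun acc target =>
      if target.1 == cnv.1 && decide (target.2.1 ≥ cnv.2.1) && decide (target.2.2 ≤ cnv.2.2)
      then acc ++ [target] else acc) []
    cnv_matrix ++ [region_targets]) []

-- ===== PORT B =====
def loadCNVMatrix_alt (targets_list : List (String × Int × Int)) (cnv_regions : List (String × Int × Int)) : List (List (String × Int × Int)) :=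
  let buckets : PySem.Dict String (List (String × Int × Int)) :=
    targets_list.foldl (fun d target => d.modify target.1 [] (· ++ [target])) PySem.Dict.empty
  cnv_regions.map (fun cnv =>
    (buckets.getD cnv.1 []).filter (fun t => decide (t.2.1 ≥ cnv.2.1) && decide (t.2.2 ≤ cnv.2.2)))

-- ===== PRECONDITION & SPEC =====
def Spec_loadCNVMatrix (targets_list : List (String × Int × Int)) (cnv_regions : List (String × Int × Int)) (out : List (List (String × Int × Int))) : Prop := out = loadCNVMatrix_alt targets_list cnv_regions
instance (targets_list : List (String × Int × Int)) (cnv_regions : List (String × Int × Int)) (out : List (List (String × Int × Int))) : Decidable (Spec_loadCNVMatrix targets_list cnv_regions out) := by unfold Spec_loadCNVMatrix; infer_instance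

-- ===== CLAIM (what is proved, stated in full; the proofs are below) =====
def Claim_equal_loadCNVMatrix : Prop := ∀ (targets_list : List (String × Int × Int)) (cnv_regions : List (String × Int × Int)), Dom_loadCNVMatrix targets_list cnv_regions → Spec_loadCNVMatrix targets_list cnv_regions (loadCNVMatrix targets_list cnv_regions)

-- ===== LEMMAS AND PROOFS =====

-- the grouping loop of B: the bucket at chromosome c holds exactly the targets with chromosome c, in order
theorem bucket_getD (l : List (String × Int × Int)) (d : PySem.Dict String (List (String × Int × Int))) (c : String) :
    (l.foldl (fun d t => d.modify t.1 [] (· ++ [t])) d).getD c []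
      = d.getD c [] ++ l.filter (fun t => t.1 == c) := by
  induction l generalizing d with
  | nil => simp
  | cons t l ih =>
    simp only [List.foldl_cons, ih, List.filter_cons]
    rw [PySem.Dict.getD_modify]
    by_cases h : c = t.1
    · simp [h, List.append_assoc]
    · simp [h, Ne.symm h]

theorem loadCNVMatrix_eq_alt (targets_list cnv_regions : List (String × Int × Int)) :
    loadCNVMatrix targets_list cnv_regions = loadCNVMatrix_alt targets_list cnv_regions := by
  unfold loadCNVMatrix loadCNVMatrix_alt
  rw [PySem.List.foldl_append_singleton_eq_map]
  simp only [List.nil_append]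
  refine List.map_congr_left (fun cnv _ => ?_)
  rw [PySem.List.foldl_append_if_eq_filter, bucket_getD, PySem.Dict.getD_empty,
      List.nil_append, List.nil_append, List.filter_filter]
  exact List.filter_congr (fun t _ => by
    cases h : (t.1 == cnv.1) <;> simp [h, Bool.and_comm])

-- ===== VERDICT (by name: the statement is the Claim_ definition above) =====
theorem loadCNVMatrix_spec : Claim_equal_loadCNVMatrix := by
  intro t c _
  exact loadCNVMatrix_eq_alt t c
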